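-- pv_equiv track=rewrite | github.com/LCW-QAQ/algorithme | src/greedy/light_and_wall.py | min_light
-- ===== SOURCE A (Python) =====
-- def min_light(s: str):
--     index = 0
--     ans = 0
--     n = len(s)
--     while index < n:
--         if s[index] == "X":
--             index += 1
--         else:
--             ans += 1
--             # 注意别越界
--             if index + 1 == n:
--                 break
--             else:
--                 if s[index + 1] == "X":
--                     index += 2
--                 else:
--                     index += 3
--     return ans
-- ===== SOURCE B (Python) =====
-- def min_light(s: str):
--     total = 0
--     run = 0
--     for c in s:
--         if c == "X":
--             total += (run + 2) // 3
--             run = 0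
--         else:
--             run += 1
--     return total + (run + 2) // 3
-- ===== Notes on version B (the rewrite author's own statement) =====
-- stated objective: simpler
-- what changed: A's index-jumping while loop (skipping 1, 2 or 3 positions with lookahead) is replaced by a single for-pass over the characters that counts the length of each maximal run of non-'X' characters and adds (run+2)//3 per run.
import Mathlib
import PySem

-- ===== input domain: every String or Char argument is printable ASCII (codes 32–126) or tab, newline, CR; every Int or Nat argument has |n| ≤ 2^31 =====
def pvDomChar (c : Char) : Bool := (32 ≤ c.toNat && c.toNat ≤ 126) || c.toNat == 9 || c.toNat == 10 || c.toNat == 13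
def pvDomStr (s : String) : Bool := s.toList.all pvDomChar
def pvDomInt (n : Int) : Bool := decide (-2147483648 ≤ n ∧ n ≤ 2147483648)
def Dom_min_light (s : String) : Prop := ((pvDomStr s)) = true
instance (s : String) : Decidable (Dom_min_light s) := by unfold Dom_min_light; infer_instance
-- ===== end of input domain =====

-- B replaces A's index-jumping while loop by a single streak-counting pass adding (run+2)//3 per maximal non-'X' run (objective: simpler).

-- ===== PORT A =====
-- A's while loop: index steps by 1 on 'X', else counts a light and steps by 2 or 3 depending on the next char.
def min_light_loop (cs : List Char) (n index : Nat) (ans : Int) : Int :=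
  if index < n then
    if cs.getD index ' ' = 'X' then
      min_light_loop cs n (index + 1) ans
    else
      if index + 1 = n then ans + 1
      else
        if cs.getD (index + 1) ' ' = 'X' then
          min_light_loop cs n (index + 2) (ans + 1)
        else
          min_light_loop cs n (index + 3) (ans + 1)
  else ans
termination_by n - index
decreasing_by all_goals omega

def min_light (s : String) : Int :=
  min_light_loop s.toList s.toList.length 0 0

-- ===== PORT B =====
def min_light_alt_loop (cs : List Char) (total run : Int) : Int :=
  match cs with
  | [] => total + PySem.Int.floordiv (run + 2) 3
  | c :: t =>
    if c = 'X' then min_light_alt_loop t (total + PySem.Int.floordiv (run + 2) 3) 0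
    else min_light_alt_loop t total (run + 1)

def min_light_alt (s : String) : Int :=
  min_light_alt_loop s.toList 0 0

-- ===== PRECONDITION & SPEC =====
def Spec_min_light (s : String) (out : Int) : Prop := out = min_light_alt s
instance (s : String) (out : Int) : Decidable (Spec_min_light s out) := by unfold Spec_min_light; infer_instance

-- ===== CLAIM (what is proved, stated in full; the proofs are below) =====
def Claim_equal_min_light : Prop := ∀ (s : String), Dom_min_light s → Spec_min_light s (min_light s)

-- ===== LEMMAS AND PROOFS =====

-- Middleman: the count A's loop produces for a suffix, written structurally on the list.
def runCount : List Char → Int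
  | [] => 0
  | c :: t =>
    if c = 'X' then runCount t
    else
      match t with
      | [] => 1
      | d :: u => if d = 'X' then 1 + runCount u else 1 + runCount (u.drop 1)
termination_by l => l.length
decreasing_by all_goals simp <;> omega

theorem runCount_nil : runCount [] = 0 := by rw [runCount.eq_def]

theorem runCount_X (t : List Char) : runCount ('X' :: t) = runCount t := by
  rw [runCount.eq_def]; simp

theorem runCount_one (c : Char) (h : ¬ c = 'X') : runCount [c] = 1 := by
  rw [runCount.eq_def]; simp [h]

theorem runCount_two (c d : Char) (u : List Char) (hc : ¬ c = 'X') (hd : d = 'X') :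
    runCount (c :: d :: u) = 1 + runCount u := by
  rw [runCount.eq_def]; simp [hc, hd]

theorem runCount_three (c d : Char) (u : List Char) (hc : ¬ c = 'X') (hd : ¬ d = 'X') :
    runCount (c :: d :: u) = 1 + runCount (u.drop 1) := by
  rw [runCount.eq_def]; simp [hc, hd]

theorem alt_loop_total (cs : List Char) : ∀ total run : Int,
    min_light_alt_loop cs total run = total + min_light_alt_loop cs 0 run := by
  induction cs with
  | nil => intro total run; simp [min_light_alt_loop]
  | cons c t ih =>
    intro total run
    by_cases h : c = 'X'
    · simp only [min_light_alt_loop, if_pos h]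
      have h1 := ih (total + PySem.Int.floordiv (run + 2) 3) 0
      have h2 := ih (0 + PySem.Int.floordiv (run + 2) 3) 0
      omega
    · simp only [min_light_alt_loop, if_neg h]
      have h1 := ih total (run + 1)
      have h2 := ih 0 (run + 1)
      omega

theorem floordiv3_shift (run : Int) (_h : 0 ≤ run) :
    PySem.Int.floordiv (run + 3 + 2) 3 = 1 + PySem.Int.floordiv (run + 2) 3 := by
  rw [PySem.Int.floordiv_eq_ediv_of_pos (by omega), PySem.Int.floordiv_eq_ediv_of_pos (by omega)]
  omega

theorem alt_loop_shift3 (cs : List Char) : ∀ run : Int, 0 ≤ run →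
    min_light_alt_loop cs 0 (run + 3) = 1 + min_light_alt_loop cs 0 run := by
  induction cs with
  | nil =>
    intro run hr
    simp only [min_light_alt_loop]
    rw [floordiv3_shift run hr]
    omega
  | cons c t ih =>
    intro run hr
    by_cases h : c = 'X'
    · simp only [min_light_alt_loop, if_pos h]
      rw [alt_loop_total t, alt_loop_total t (0 + PySem.Int.floordiv (run + 2) 3)]
      rw [floordiv3_shift run hr]
      omega
    · simp only [min_light_alt_loop, if_neg h]
      rw [show run + 3 + 1 = (run + 1) + 3 by ring, ih (run + 1) (by omega)]

theorem fd2 : PySem.Int.floordiv (0 + 2) 3 = 0 := by decide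
theorem fd3 : PySem.Int.floordiv (0 + 1 + 2) 3 = 1 := by decide
theorem fd4 : PySem.Int.floordiv (0 + 1 + 1 + 2) 3 = 1 := by decide

theorem runCount_eq_alt (n : Nat) : ∀ cs : List Char, cs.length ≤ n →
    runCount cs = min_light_alt_loop cs 0 0 := by
  induction n with
  | zero =>
    intro cs h
    have : cs = [] := by cases cs <;> simp_all
    subst this; simp [runCount, min_light_alt_loop]
  | succ n ih =>
    intro cs h
    match cs with
    | [] => simp [runCount_nil, min_light_alt_loop]
    | c :: t =>
      by_cases hc : c = 'X'
      · subst hc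
        simp only [min_light_alt_loop, if_true, runCount_X]
        rw [alt_loop_total t, fd2, ih t (by simpa using Nat.le_of_succ_le_succ h)]
        omega
      · match t with
        | [] =>
          simp only [min_light_alt_loop, if_neg hc]
          rw [runCount_one c hc, fd3]
          omega
        | d :: u =>
          by_cases hd : d = 'X'
          · subst hd
            simp only [min_light_alt_loop, if_neg hc, if_true]
            rw [runCount_two c 'X' u hc rfl, alt_loop_total u, fd3,
              ih u (by simp at h ⊢; omega)]
            omega
          · rw [runCount_three c d u hc hd]
            simp only [min_light_alt_loop, if_neg hc, if_neg hd]
            match u with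
            | [] =>
              simp only [min_light_alt_loop, List.drop_nil, runCount_nil]
              rw [fd4]
              omega
            | e :: v =>
              by_cases he : e = 'X'
              · subst he
                simp only [min_light_alt_loop, if_true, List.drop_succ_cons, List.drop_zero]
                rw [alt_loop_total v, fd4, ih v (by simp at h ⊢; omega)]
                omega
              · simp only [min_light_alt_loop, if_neg he, List.drop_succ_cons, List.drop_zero]
                rw [show (0:Int) + 1 + 1 + 1 = 0 + 3 by ring, alt_loop_shift3 v 0 (by omega),
                  ih v (by simp at h ⊢; omega)]

theorem loopA_eq_runCount (k : Nat) : ∀ (cs : List Char) (index : Nat) (ans : Int),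
    cs.length - index ≤ k →
    min_light_loop cs cs.length index ans = ans + runCount (cs.drop index) := by
  induction k with
  | zero =>
    intro cs index ans h
    have hge : cs.length ≤ index := by omega
    rw [min_light_loop]
    simp [Nat.not_lt.mpr hge, List.drop_eq_nil_of_le hge, runCount]
  | succ k ih =>
    intro cs index ans h
    by_cases hlt : index < cs.length
    · have hdrop : cs.drop index = cs[index] :: cs.drop (index + 1) :=
        List.drop_eq_getElem_cons hlt
      have hget : cs.getD index ' ' = cs[index] := List.getD_eq_getElem cs ' ' hlt
      rw [min_light_loop]
      rw [if_pos hlt, hget]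
      by_cases hc : cs[index] = 'X'
      · rw [if_pos hc, ih cs (index + 1) ans (by omega), hdrop, hc, runCount_X]
      · rw [if_neg hc, hdrop]
        by_cases hend : index + 1 = cs.length
        · have hnil : cs.drop (index + 1) = [] := List.drop_eq_nil_of_le (by omega)
          rw [if_pos hend, hnil, runCount_one _ hc]
        · have hlt2 : index + 1 < cs.length := by omega
          have hdrop2 : cs.drop (index + 1) = cs[index + 1] :: cs.drop (index + 2) :=
            List.drop_eq_getElem_cons hlt2
          have hget2 : cs.getD (index + 1) ' ' = cs[index + 1] := List.getD_eq_getElem cs ' ' hlt2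
          rw [if_neg hend, hget2, hdrop2]
          by_cases hd : cs[index + 1] = 'X'
          · rw [if_pos hd, hd, runCount_two _ _ _ hc rfl,
              ih cs (index + 2) (ans + 1) (by omega)]
            ring
          · rw [if_neg hd, runCount_three _ _ _ hc hd,
              ih cs (index + 3) (ans + 1) (by omega), List.drop_drop]
            ring
    · rw [min_light_loop]
      rw [if_neg hlt, List.drop_eq_nil_of_le (by omega : cs.length ≤ index), runCount_nil]
      omega

-- ===== VERDICT (by name: the statement is the Claim_ definition above) =====
theorem min_light_spec : Claim_equal_min_light := by
  intro s _
  unfold Spec_min_light min_light min_light_alt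
  rw [loopA_eq_runCount s.toList.length s.toList 0 0 (by omega)]
  simp only [List.drop_zero, zero_add]
  exact runCount_eq_alt s.toList.length s.toList (le_refl _)
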